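-- pv_equiv track=rewrite | github.com/nalimeitb/codingtest_Python | 프로그래머스/0/181932. 코드 처리하기/코드 처리하기.py | solution
-- ===== SOURCE A (Python) =====
-- def solution(code):
--     ret = ''
--     answer = ''
--     mode = 0
--
--     for idx in range(len(code)) :
--         if mode == 0 :
--             if code[idx] != '1' :
--                 if idx % 2 == 0 :
--                     ret = ret + code[idx]
--             if code[idx] == '1' :
--                 mode = 1
--         elif mode == 1 :
--             if code[idx] != '1' :
--                 if idx % 2 != 0 :
--                     ret = ret + code[idx]
--             if code[idx] == '1' :
--                 mode = 0
--
--     if ret == '' :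
--         answer = "EMPTY"
--     else :
--         answer = ret
--
--     return answer
-- ===== SOURCE B (Python) =====
-- def solution(code):
--     kept = [c for i, c in enumerate(code)
--             if c != '1' and i % 2 == code[:i].count('1') % 2]
--     return ''.join(kept) if kept else "EMPTY"
-- ===== Notes on version B (the rewrite author's own statement) =====
-- stated objective: simpler
-- what changed: A's two-state toggle automaton with duplicated if/elif branches and string concatenation is replaced by a stateless filter comprehension that decides each character directly: keep code[i] iff it is not '1' and i % 2 equals the parity of the count of '1' in code[:i] (the mode in closed form).
import Mathlib
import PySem

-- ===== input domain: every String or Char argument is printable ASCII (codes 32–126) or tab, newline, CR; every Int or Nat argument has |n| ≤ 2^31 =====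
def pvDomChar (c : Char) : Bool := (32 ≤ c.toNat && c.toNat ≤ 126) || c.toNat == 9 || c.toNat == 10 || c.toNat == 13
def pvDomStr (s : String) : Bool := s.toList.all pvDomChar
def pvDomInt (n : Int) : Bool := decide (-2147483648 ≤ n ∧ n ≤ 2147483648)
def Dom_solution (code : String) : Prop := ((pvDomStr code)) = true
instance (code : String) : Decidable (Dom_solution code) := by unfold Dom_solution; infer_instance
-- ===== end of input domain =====

-- B replaces A's two-state toggle loop by a stateless filter that computes the mode at each
-- index in closed form (parity of the count of '1' in the prefix); objective: simpler, not faster.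

-- ===== PORT A =====
-- A's for-loop over range(len(code)): state is (ret, mode), code[idx] read by index.
def solution (code : String) : String :=
  let cs := code.toList
  let st := (PySem.List.pyRange 0 (PySem.Str.len code) 1).foldl
    (fun (st : List Char × Int) idx =>
      let c := PySem.List.pyGetD cs idx ' '
      if st.2 == 0 then
        let ret := if c != '1' then (if PySem.Int.mod idx 2 == 0 then st.1 ++ [c] else st.1) else st.1
        let mode := if c == '1' then (1 : Int) else st.2
        (ret, mode)
      else if st.2 == 1 then
        let ret := if c != '1' then (if PySem.Int.mod idx 2 != 0 then st.1 ++ [c] else st.1) else st.1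
        let mode := if c == '1' then (0 : Int) else st.2
        (ret, mode)
      else st)
    ([], 0)
  if st.1 == [] then "EMPTY" else String.ofList st.1

-- ===== PORT B =====
-- B's comprehension: keep code[i] iff code[i] != '1' and i % 2 == code[:i].count('1') % 2.
def solution_alt (code : String) : String :=
  let cs := code.toList
  let kept := ((PySem.List.enumerate cs 0).filter (fun ic =>
      ic.2 != '1' &&
        (PySem.Int.mod ic.1 2 ==
          PySem.Int.mod ((PySem.Chars.count (PySem.List.slice cs none (some ic.1)) ['1'] : Int)) 2))).map (·.2)
  if kept == [] then "EMPTY" else String.ofList kept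

-- ===== PRECONDITION & SPEC =====
def Spec_solution (code : String) (out : String) : Prop := out = solution_alt code
instance (code : String) (out : String) : Decidable (Spec_solution code out) := by unfold Spec_solution; infer_instance

-- ===== CLAIM (what is proved, stated in full; the proofs are below) =====
def Claim_equal_solution : Prop := ∀ (code : String), Dom_solution code → Spec_solution code (solution code)

-- ===== LEMMAS AND PROOFS =====

-- Chars.count with a one-character needle is List.count (unfolding the fueled go).
lemma count_go_singleton (c : Char) :
    ∀ (l : List Char) (fuel acc : Nat), l.length ≤ fuel →
      PySem.Chars.count.go [c] fuel l acc = acc + l.count c := by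
  intro l
  induction l with
  | nil => intro fuel acc _; cases fuel <;> simp [PySem.Chars.count.go]
  | cons h t ih =>
    intro fuel acc hle
    cases fuel with
    | zero => simp at hle
    | succ f =>
      rw [PySem.Chars.count.go.eq_def]
      simp only [List.length_cons] at hle
      by_cases hc : c = h
      · subst hc
        simp [List.isPrefixOf, ih f (acc+1) (by omega)]
        omega
      · simp [List.isPrefixOf, hc, ih f acc (by omega), Ne.symm hc]

lemma chars_count_singleton (c : Char) (l : List Char) :
    PySem.Chars.count l [c] = l.count c := by
  simpa using count_go_singleton c l l.length 0 le_rfl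

-- Python % with a positive divisor is Int.emod.
lemma pymod_two (a : Int) : PySem.Int.mod a 2 = a % 2 := by
  unfold PySem.Int.mod; rw [Int.fmod_eq_emod_of_nonneg]; omega

-- A's loop step, as a function of the enumerated pair (idx, char).
def stepA (st : List Char × Int) (p : Int × Char) : List Char × Int :=
  if st.2 == 0 then
    (if p.2 != '1' then (if PySem.Int.mod p.1 2 == 0 then st.1 ++ [p.2] else st.1) else st.1,
     if p.2 == '1' then (1 : Int) else st.2)
  else if st.2 == 1 then
    (if p.2 != '1' then (if PySem.Int.mod p.1 2 != 0 then st.1 ++ [p.2] else st.1) else st.1,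
     if p.2 == '1' then (0 : Int) else st.2)
  else st

-- B's filter predicate over a fixed character list.
def predB (cs : List Char) (ic : Int × Char) : Bool :=
  ic.2 != '1' &&
    (PySem.Int.mod ic.1 2 ==
      PySem.Int.mod ((PySem.Chars.count (PySem.List.slice cs none (some ic.1)) ['1'] : Int)) 2)

-- A's index loop is the fold of stepA over the enumeration.
lemma solution_eq_foldA (code : String) :
    solution code =
      (if ((PySem.List.enumerate code.toList 0).foldl stepA ([], 0)).1 == [] then "EMPTY"
       else String.ofList ((PySem.List.enumerate code.toList 0).foldl stepA ([], 0)).1) := by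
  unfold solution
  rw [PySem.List.enumerate_eq_map_pyRange code.toList ' ', List.foldl_map]
  simp only [PySem.Str.len_eq, PySem.List.len_eq, stepA]

-- Loop invariant, by snoc induction: the built string is B's filter, the mode is the
-- parity of the number of '1' seen so far.
lemma foldA_eq (cs : List Char) :
    (PySem.List.enumerate cs 0).foldl stepA ([], 0) =
      (((PySem.List.enumerate cs 0).filter (predB cs)).map (·.2),
       ((cs.count '1' : Nat) : Int) % 2) := by
  induction cs using List.reverseRecOn with
  | nil => simp [PySem.List.enumerate]
  | append_singleton xs c ih =>
    have hn : (PySem.List.enumerate [c] ((0:Int) + ↑xs.length)) = [((xs.length : Int), c)] := by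
      simp [PySem.List.enumerate_cons, PySem.List.enumerate_nil]
    rw [PySem.List.enumerate_append, hn, List.foldl_append, ih, List.filter_append]
    -- predB looks only at the prefix before the index, so it agrees on the old elements
    have hfc : (PySem.List.enumerate xs 0).filter (predB (xs ++ [c])) =
        (PySem.List.enumerate xs 0).filter (predB xs) := by
      apply List.filter_congr
      intro p hp
      rcases (PySem.List.mem_enumerate_iff xs 0 p).1 hp with ⟨k, hk, rfl⟩
      simp only [predB, zero_add]
      rw [PySem.List.slice_to_natCast, PySem.List.slice_to_natCast,
        List.take_append_of_le_length (le_of_lt hk)]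
    rw [hfc]
    -- the new element sees exactly xs as its prefix
    have hslice : PySem.List.slice (xs ++ [c]) none (some (xs.length : Int)) = xs := by
      rw [PySem.List.slice_to_natCast, List.take_append_of_le_length le_rfl, List.take_length]
    have hpred : predB (xs ++ [c]) ((xs.length : Int), c) =
        (c != '1' && ((xs.length : Int) % 2 == ((xs.count '1' : Nat) : Int) % 2)) := by
      simp only [predB, hslice, chars_count_singleton, pymod_two]
    have hcnt : (((xs ++ [c]).count '1' : Nat) : Int) =
        ((xs.count '1' : Nat) : Int) + (if c = '1' then 1 else 0) := by
      by_cases hc1 : c = '1' <;> simp [List.count_append, hc1]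
    rw [hcnt]
    rcases Int.emod_two_eq_zero_or_one ((xs.count '1' : Nat) : Int) with hm | hm <;>
      by_cases hc : c = '1' <;>
        rcases Int.emod_two_eq_zero_or_one ((xs.length : Nat) : Int) with hp2 | hp2 <;>
          simp [stepA, hm, hc, hpred, hp2, List.filter_cons]
    all_goals exact ⟨by simp [predB], by omega⟩

-- ===== VERDICT (by name: the statement is the Claim_ definition above) =====
theorem solution_spec : Claim_equal_solution := by
  intro code _
  unfold Spec_solution solution_alt
  rw [solution_eq_foldA, foldA_eq]
  rfl
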